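-- pv_equiv track=rewrite | github.com/KindNeighbor/Algorithm_Practice | 백준/Bronze/1942. 디지털시계/디지털시계.py | count_3_multiples_in_segment
-- ===== SOURCE A (Python) =====
-- def is_valid_time(t):
--    h = t // 10000
--    m = (t % 10000) // 100
--    s = t % 100
--    return 0 <= h <= 23 and 0 <= m <= 59 and 0 <= s <= 59
--
-- def count_3_multiples_in_segment(start, end):
--    if start > end:
--        return 0
--    if start < 6000 and end > 9999:
--        return (count_3_multiples_in_segment(start, 5959) +
--                count_3_multiples_in_segment(10000, end))
--    elif 6000 <= start <= 9999 or 6000 <= end <= 9999: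
--        return 0
--
--    first = start + (3 - (start % 3)) % 3
--    while first <= end and not is_valid_time(first):
--        first += 3
--
--    last = end - (end % 3)
--    while last >= start and not is_valid_time(last):
--        last -= 3
--
--    if first > end or last < start:
--        return 0
--
--    count = 0
--    for num in range(first, last + 1, 3):
--        if is_valid_time(num):
--            count += 1
--    return count
-- ===== SOURCE B (Python) =====
-- def count_3_multiples_in_segment(start, end):
--     total = 0
--     for h in range(24):
--         for m in range(60):
--             base = h * 10000 + m * 100
--             lo = max(start - base, 0)
--             hi = min(end - base, 59)
--             if lo <= hi:
--                 r = -(h + m) % 3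
--                 total += (hi - r) // 3 - (lo - 1 - r) // 3
--     return total
-- ===== Notes on version B (the rewrite author's own statement) =====
-- stated objective: faster
-- what changed: B replaces A's per-integer scan of the whole segment (plus while-loop endpoint adjustment and a buggy gap shortcut) by a constant 24x60 loop over (hour,minute) pairs with a closed-form count of matching seconds.
-- intended difference: On segments that straddle exactly one side of the invalid band 6000..9999 without A's split branch firing (start in [6000,9999] with end >= 10002, or start <= 5958 with end in [6000,9999]), A's gap shortcut returns 0 although the segment contains valid times divisible by 3, while B returns the true count, which is the intended value. — e.g. on count_3_multiples_in_segment(6000, 10002): A returns 0, B returns 1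
import Mathlib
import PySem

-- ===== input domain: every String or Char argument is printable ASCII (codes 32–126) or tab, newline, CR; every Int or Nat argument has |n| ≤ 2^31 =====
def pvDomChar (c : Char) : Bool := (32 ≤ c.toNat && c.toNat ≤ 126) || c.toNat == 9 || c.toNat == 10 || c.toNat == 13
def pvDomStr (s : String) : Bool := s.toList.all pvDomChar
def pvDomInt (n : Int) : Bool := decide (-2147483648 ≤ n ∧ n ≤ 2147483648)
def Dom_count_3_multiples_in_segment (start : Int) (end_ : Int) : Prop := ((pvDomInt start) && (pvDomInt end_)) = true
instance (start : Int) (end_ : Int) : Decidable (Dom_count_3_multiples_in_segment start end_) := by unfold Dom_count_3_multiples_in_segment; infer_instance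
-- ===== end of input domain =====

-- B replaces A's per-integer scan of the segment by a constant 24x60 loop over (hour,minute)
-- pairs with a closed-form count of the matching seconds; on two one-sided straddles of the
-- invalid band 6000..9999 A's shortcut wrongly returns 0 (see D_ below) and B returns the true count.

-- ===== PORT A =====
def is_valid_time (t : Int) : Bool :=
  let h := PySem.Int.floordiv t 10000
  let m := PySem.Int.floordiv (PySem.Int.mod t 10000) 100
  let s := PySem.Int.mod t 100
  decide (0 ≤ h ∧ h ≤ 23) && decide (0 ≤ m ∧ m ≤ 59) && decide (0 ≤ s ∧ s ≤ 59)

-- 'while first <= end and not is_valid_time(first): first += 3'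
def firstUp (end_ : Int) (first : Int) : Int :=
  if first ≤ end_ ∧ ¬ (is_valid_time first = true) then firstUp end_ (first + 3) else first
termination_by (end_ + 3 - first).toNat
decreasing_by omega

-- 'while last >= start and not is_valid_time(last): last -= 3'
def lastDown (start : Int) (last : Int) : Int :=
  if start ≤ last ∧ ¬ (is_valid_time last = true) then lastDown start (last - 3) else last
termination_by (last + 3 - start).toNat
decreasing_by omega

def count_3_multiples_in_segment (start : Int) (end_ : Int) : Int :=
  if start > end_ then 0
  else if start < 6000 ∧ end_ > 9999 then
    count_3_multiples_in_segment start 5959 + count_3_multiples_in_segment 10000 end_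
  else if (6000 ≤ start ∧ start ≤ 9999) ∨ (6000 ≤ end_ ∧ end_ ≤ 9999) then 0
  else
    let first := firstUp end_ (start + PySem.Int.mod (3 - PySem.Int.mod start 3) 3)
    let last := lastDown start (end_ - PySem.Int.mod end_ 3)
    if first > end_ ∨ last < start then 0
    else
      (PySem.List.pyRange first (last + 1) 3).foldl
        (fun count num => if is_valid_time num = true then count + 1 else count) 0
termination_by (if start < 6000 ∧ end_ > 9999 then 1 else 0)
decreasing_by all_goals (split_ifs <;> omega)

-- ===== PORT B =====
def count_3_multiples_in_segment_alt (start : Int) (end_ : Int) : Int :=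
  (PySem.List.pyRange 0 24 1).foldl (fun total h =>
    (PySem.List.pyRange 0 60 1).foldl (fun total m =>
      let base := h * 10000 + m * 100
      let lo := Max.max (start - base) 0
      let hi := Min.min (end_ - base) 59
      if lo ≤ hi then
        let r := PySem.Int.mod (-(h + m)) 3
        total + (PySem.Int.floordiv (hi - r) 3 - PySem.Int.floordiv (lo - 1 - r) 3)
      else total) total) 0

-- ===== PRECONDITION & SPEC =====
-- On segments straddling exactly one side of the invalid band 6000..9999 without A's split
-- branch firing (start in [6000,9999] with end_ >= 10002, or start <= 5958 with end_ in
-- [6000,9999]), A's gap shortcut returns 0 although the segment contains valid clock times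
-- divisible by 3; B returns their true count, which is the intended value.
def D_count_3_multiples_in_segment (start : Int) (end_ : Int) : Prop :=
  start ≤ end_ ∧ ((6000 ≤ start ∧ start ≤ 9999 ∧ 10002 ≤ end_) ∨
                  (start ≤ 5958 ∧ 6000 ≤ end_ ∧ end_ ≤ 9999))
instance (start : Int) (end_ : Int) : Decidable (D_count_3_multiples_in_segment start end_) := by
  unfold D_count_3_multiples_in_segment; infer_instance

def Spec_count_3_multiples_in_segment (start : Int) (end_ : Int) (out : Int) : Prop :=
  ¬ D_count_3_multiples_in_segment start end_ → out = count_3_multiples_in_segment_alt start end_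
instance (start : Int) (end_ : Int) (out : Int) : Decidable (Spec_count_3_multiples_in_segment start end_ out) := by
  unfold Spec_count_3_multiples_in_segment; infer_instance

def pvDiffWitness_count_3_multiples_in_segment : Int × Int := (6000, 10002)
def pvDiffWitnessOut_count_3_multiples_in_segment : Int × Int := (0, 1)

-- ===== CLAIM (what is proved, stated in full; the proofs are below) =====
def Claim_unchanged_count_3_multiples_in_segment : Prop := ∀ (start : Int) (end_ : Int), Dom_count_3_multiples_in_segment start end_ → Spec_count_3_multiples_in_segment start end_ (count_3_multiples_in_segment start end_)
def Claim_changed_count_3_multiples_in_segment : Prop := Dom_count_3_multiples_in_segment (pvDiffWitness_count_3_multiples_in_segment.1) (pvDiffWitness_count_3_multiples_in_segment.2) ∧ D_count_3_multiples_in_segment (pvDiffWitness_count_3_multiples_in_segment.1) (pvDiffWitness_count_3_multiples_in_segment.2) ∧ count_3_multiples_in_segment (pvDiffWitness_count_3_multiples_in_segment.1) (pvDiffWitness_count_3_multiples_in_segment.2) = pvDiffWitnessOut_count_3_multiples_in_segment.1 ∧ count_3_multiples_in_segment_alt (pvDiffWitness_count_3_multiples_in_segment.1) (pvDiffWitness_count_3_multiples_in_segment.2)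 = pvDiffWitnessOut_count_3_multiples_in_segment.2 ∧ pvDiffWitnessOut_count_3_multiples_in_segment.1 ≠ pvDiffWitnessOut_count_3_multiples_in_segment.2
def Claim_exact_count_3_multiples_in_segment : Prop := ∀ (start : Int) (end_ : Int), Dom_count_3_multiples_in_segment start end_ → D_count_3_multiples_in_segment start end_ → count_3_multiples_in_segment start end_ ≠ count_3_multiples_in_segment_alt start end_

-- ===== LEMMAS AND PROOFS =====

-- the common ground truth: t is a valid HHMMSS time and divisible by 3
abbrev P3 (t : Int) : Prop := t % 3 = 0 ∧ is_valid_time t = true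

noncomputable def Cnt (start end_ : Int) : Nat := ((Finset.Icc start end_).filter P3).card

lemma valid_iff (t : Int) : is_valid_time t = true ↔
    (0 ≤ t / 10000 ∧ t / 10000 ≤ 23 ∧ 0 ≤ (t % 10000) / 100 ∧ (t % 10000) / 100 ≤ 59 ∧
     0 ≤ t % 100 ∧ t % 100 ≤ 59) := by
  have e1 : PySem.Int.floordiv t 10000 = t / 10000 := PySem.Int.floordiv_eq_ediv_of_pos (by norm_num)
  have e2 : PySem.Int.mod t 10000 = t % 10000 := PySem.Int.mod_eq_emod_of_pos (by norm_num)
  have e3 : PySem.Int.floordiv (PySem.Int.mod t 10000) 100 = (t % 10000) / 100 := by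
    rw [e2]; exact PySem.Int.floordiv_eq_ediv_of_pos (by norm_num)
  have e4 : PySem.Int.mod t 100 = t % 100 := PySem.Int.mod_eq_emod_of_pos (by norm_num)
  simp only [is_valid_time, e1, e3, e4, Bool.and_eq_true, decide_eq_true_eq, and_assoc]

-- ---- while-loop invariants ----
lemma firstUp_ge (end_ first : Int) : first ≤ firstUp end_ first := by
  rw [firstUp]
  split
  · have := firstUp_ge end_ (first + 3); omega
  · omega
termination_by (end_ + 3 - first).toNat
decreasing_by omega

lemma firstUp_skip (end_ first : Int) (hmod : first % 3 = 0) :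
    ∀ t, first ≤ t → t ≤ end_ → t % 3 = 0 → is_valid_time t = true → firstUp end_ first ≤ t := by
  intro t h1 h2 h3 h4
  rw [firstUp]
  split
  · next h =>
    have hne : first ≠ t := by rintro rfl; exact h.2 h4
    exact firstUp_skip end_ (first + 3) (by omega) t (by omega) h2 h3 h4
  · omega
termination_by (end_ + 3 - first).toNat
decreasing_by omega

lemma lastDown_le (start last : Int) : lastDown start last ≤ last := by
  rw [lastDown]
  split
  · have := lastDown_le start (last - 3); omega
  · omega
termination_by (last + 3 - start).toNat
decreasing_by omega

lemma lastDown_skip (start last : Int) (hmod : last % 3 = 0) :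
    ∀ t, t ≤ last → start ≤ t → t % 3 = 0 → is_valid_time t = true → t ≤ lastDown start last := by
  intro t h1 h2 h3 h4
  rw [lastDown]
  split
  · next h =>
    have hne : last ≠ t := by rintro rfl; exact h.2 h4
    exact lastDown_skip start (last - 3) (by omega) t (by omega) h2 h3 h4
  · omega
termination_by (last + 3 - start).toNat
decreasing_by omega

-- ---- counting multiples of 3 in an integer interval ----
lemma Icc_card_mod3 : ∀ (n : Nat) (a b : Int), b - a + 1 = n →
    (((Finset.Icc a b).filter (fun t => t % 3 = 0)).card : Int) = b / 3 - (a - 1) / 3 := by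
  intro n
  induction n with
  | zero =>
    intro a b hn
    rw [Finset.Icc_eq_empty (by omega)]
    simp; omega
  | succ k ih =>
    intro a b hn
    have hab : a ≤ b := by omega
    have hins : Finset.Icc a b = insert b (Finset.Icc a (b - 1)) := by
      ext t; simp [Finset.mem_Icc, Finset.mem_insert]; omega
    rw [hins, Finset.filter_insert]
    have hnm : b ∉ (Finset.Icc a (b - 1)).filter (fun t => t % 3 = 0) := by
      simp [Finset.mem_Icc]
    have ih' := ih a (b - 1) (by omega)
    split
    · next h3 => rw [Finset.card_insert_of_notMem hnm]; push_cast; omega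
    · next h3 => rw [ih']; omega

-- ---- mod-3 invariance of the while loops ----
lemma firstUp_mod (end_ first : Int) (h : first % 3 = 0) : firstUp end_ first % 3 = 0 := by
  rw [firstUp]
  split
  · exact firstUp_mod end_ (first + 3) (by omega)
  · exact h
termination_by (end_ + 3 - first).toNat
decreasing_by omega

lemma lastDown_mod (start last : Int) (h : last % 3 = 0) : lastDown start last % 3 = 0 := by
  rw [lastDown]
  split
  · exact lastDown_mod start (last - 3) (by omega)
  · exact h
termination_by (last + 3 - start).toNat
decreasing_by omega

-- ---- A's main body computes Cnt ----
lemma A_main (start end_ : Int) (hle : start ≤ end_)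
    (h1 : ¬(start < 6000 ∧ end_ > 9999))
    (h2 : ¬(6000 ≤ start ∧ start ≤ 9999)) (h3 : ¬(6000 ≤ end_ ∧ end_ ≤ 9999)) :
    count_3_multiples_in_segment start end_ = (Cnt start end_ : Int) := by
  rw [count_3_multiples_in_segment, if_neg (by omega), if_neg h1, if_neg (by tauto)]
  simp only [PySem.Int.mod_eq_emod_of_pos (show (0:Int) < 3 by norm_num)]
  set f0 := start + (3 - start % 3) % 3 with hf0
  set l0 := end_ - end_ % 3 with hl0
  have hf0m : f0 % 3 = 0 := by omega
  have hl0m : l0 % 3 = 0 := by omega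
  set f := firstUp end_ f0 with hf
  set l := lastDown start l0 with hl
  have hfge : f0 ≤ f := firstUp_ge end_ f0
  have hfm : f % 3 = 0 := firstUp_mod end_ f0 hf0m
  have hlle : l ≤ l0 := lastDown_le start l0
  have hlm : l % 3 = 0 := lastDown_mod start l0 hl0m
  have hskipf : ∀ t, start ≤ t → t ≤ end_ → P3 t → f ≤ t := by
    intro t ht1 ht2 hp
    obtain ⟨hpm, hpv⟩ := hp
    exact firstUp_skip end_ f0 hf0m t (by omega) ht2 hpm hpv
  have hskipl : ∀ t, start ≤ t → t ≤ end_ → P3 t → t ≤ l := by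
    intro t ht1 ht2 hp
    obtain ⟨hpm, hpv⟩ := hp
    exact lastDown_skip start l0 hl0m t (by omega) ht1 hpm hpv
  split
  · next hout =>
    have hemp : ((Finset.Icc start end_).filter P3) = ∅ := by
      ext t
      simp only [Finset.mem_filter, Finset.mem_Icc, Finset.notMem_empty, iff_false, not_and]
      intro ht hpm hpv
      have ha := hskipf t ht.1 ht.2 ⟨hpm, hpv⟩
      have hb := hskipl t ht.1 ht.2 ⟨hpm, hpv⟩
      omega
    simp [Cnt, hemp]
  · next hout =>
    rw [PySem.List.foldl_count_if]
    have hnd : (PySem.List.pyRange f (l + 1) 3).Nodup := by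
      rw [PySem.List.pyRange_of_pos _ _ (by norm_num)]
      refine List.Nodup.map ?_ (List.nodup_range)
      intro k1 k2 hk
      have hk' : f + 3 * (k1 : Int) = f + 3 * (k2 : Int) := hk
      omega
    have hset : ((PySem.List.pyRange f (l + 1) 3).filter is_valid_time).toFinset
        = (Finset.Icc start end_).filter P3 := by
      ext t
      simp only [List.mem_toFinset, List.mem_filter,
        PySem.List.mem_pyRange_iff_of_pos (show (0:Int) < 3 by norm_num),
        Finset.mem_filter, Finset.mem_Icc]
      constructor
      · rintro ⟨⟨hg, hlt, hdvd⟩, hv⟩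
        exact ⟨⟨by omega, by omega⟩, by omega, hv⟩
      · rintro ⟨⟨ht1, ht2⟩, hp⟩
        obtain ⟨hpm, hpv⟩ := hp
        have ha := hskipf t ht1 ht2 ⟨hpm, hpv⟩
        have hb := hskipl t ht1 ht2 ⟨hpm, hpv⟩
        exact ⟨⟨by omega, by omega, by omega⟩, hpv⟩
    have hcard : Cnt start end_
        = ((PySem.List.pyRange f (l + 1) 3).filter is_valid_time).length := by
      rw [Cnt, ← hset, List.toFinset_card_of_nodup (hnd.filter _)]
    rw [List.countP_eq_length_filter, hcard]
    norm_num

-- ---- A on low and high plain segments ----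
lemma A_low (start end_ : Int) (h : start < 6000) (h' : end_ < 6000) :
    count_3_multiples_in_segment start end_ = (Cnt start end_ : Int) := by
  by_cases hle : start ≤ end_
  · exact A_main start end_ hle (by omega) (by omega) (by omega)
  · rw [count_3_multiples_in_segment, if_pos (by omega)]
    rw [Cnt, Finset.Icc_eq_empty (by omega)]
    simp

-- ---- splitting Cnt across the empty band [5960, 9999] ----
lemma novalid_band (t : Int) (h : 5960 ≤ t) (h' : t ≤ 9999) : ¬ is_valid_time t = true := by
  rw [valid_iff]; omega

lemma Cnt_split (start end_ : Int) (h : start < 6000) (h' : 9999 < end_) :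
    Cnt start end_ = Cnt start 5959 + Cnt 10000 end_ := by
  have hun : (Finset.Icc start end_).filter P3
      = ((Finset.Icc start 5959).filter P3) ∪ ((Finset.Icc 10000 end_).filter P3) := by
    ext t
    simp only [Finset.mem_filter, Finset.mem_Icc, Finset.mem_union]
    constructor
    · rintro ⟨⟨h1, h2⟩, hp⟩
      have hband : ¬ (5960 ≤ t ∧ t ≤ 9999) := by
        intro hb; exact novalid_band t hb.1 hb.2 hp.2
      rcases le_or_gt t 5959 with hc | hc
      · exact Or.inl ⟨⟨h1, hc⟩, hp⟩
      · exact Or.inr ⟨⟨by omega, h2⟩, hp⟩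
    · rintro (⟨⟨h1, h2⟩, hp⟩ | ⟨⟨h1, h2⟩, hp⟩)
      · exact ⟨⟨h1, by omega⟩, hp⟩
      · exact ⟨⟨by omega, h2⟩, hp⟩
  have hdis : Disjoint ((Finset.Icc start 5959).filter P3)
      ((Finset.Icc 10000 end_).filter P3) := by
    rw [Finset.disjoint_left]
    intro t ht1 ht2
    simp only [Finset.mem_filter, Finset.mem_Icc] at ht1 ht2
    omega
  rw [Cnt, hun, Finset.card_union_of_disjoint hdis]; rfl

-- ---- B: per-minute closed-form term ----
def Tm (start end_ h m : Int) : Int :=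
  if Max.max (start - (h * 10000 + m * 100)) 0 ≤ Min.min (end_ - (h * 10000 + m * 100)) 59 then
    PySem.Int.floordiv (Min.min (end_ - (h * 10000 + m * 100)) 59 - PySem.Int.mod (-(h + m)) 3) 3 -
      PySem.Int.floordiv (Max.max (start - (h * 10000 + m * 100)) 0 - 1 - PySem.Int.mod (-(h + m)) 3) 3
  else 0

noncomputable def Blk (start end_ : Int) (hm : Int × Int) : Finset Int :=
  (Finset.Icc (Max.max start (hm.1 * 10000 + hm.2 * 100))
    (Min.min end_ (hm.1 * 10000 + hm.2 * 100 + 59))).filter P3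

lemma foldl_body_add (F : Int → Int) (G : Int → Int → Int)
    (hG : ∀ a x, G a x = a + F x) : ∀ (l : List Int) (a : Int), l.foldl G a = a + (l.map F).sum := by
  intro l
  induction l with
  | nil => intro a; simp
  | cons x xs ih =>
    intro a
    rw [List.foldl_cons, hG, ih, List.map_cons, List.sum_cons]
    ring

lemma sum_pyRange_map (g : Int → Int) : ∀ (n : Nat) (a b : Int), b - a = n →
    ((PySem.List.pyRange a b 1).map g).sum = ∑ t ∈ Finset.Icc a (b - 1), g t := by
  intro n
  induction n with
  | zero =>
    intro a b hn
    rw [PySem.List.pyRange_one_eq_nil (by omega), Finset.Icc_eq_empty (by omega)]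
    simp
  | succ k ih =>
    intro a b hn
    have h1 : PySem.List.pyRange a b 1 = PySem.List.pyRange a (b - 1) 1 ++ [b - 1] := by
      have := PySem.List.pyRange_one_succ_right (a := a) (b := b - 1) (by omega)
      rw [show b - 1 + 1 = b by ring] at this
      exact this
    have h2 : Finset.Icc a (b - 1) = insert (b - 1) (Finset.Icc a (b - 1 - 1)) := by
      ext t; simp only [Finset.mem_Icc, Finset.mem_insert]; omega
    rw [h1, List.map_append, List.sum_append, ih a (b - 1) (by omega), h2,
      Finset.sum_insert (by simp only [Finset.mem_Icc]; omega)]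
    simp; ring

lemma block_valid (h m t : Int) (hh : 0 ≤ h) (hh' : h ≤ 23) (hm : 0 ≤ m) (hm' : m ≤ 59)
    (ht : h * 10000 + m * 100 ≤ t) (ht' : t ≤ h * 10000 + m * 100 + 59) :
    is_valid_time t = true := by
  rw [valid_iff]; omega

lemma Tm_eq_card (start end_ h m : Int) (hh : 0 ≤ h) (hh' : h ≤ 23) (hm : 0 ≤ m) (hm' : m ≤ 59) :
    Tm start end_ h m = ((Blk start end_ (h, m)).card : Int) := by
  have hb3 : h * 10000 + m * 100 = (h + m) + 3 * (h * 3333 + m * 33) := by ring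
  set base := h * 10000 + m * 100 with hbase
  have hr : PySem.Int.mod (-(h + m)) 3 = (-(h + m)) % 3 :=
    PySem.Int.mod_eq_emod_of_pos (by norm_num)
  -- linearize the four max/min atoms
  have c1 := max_choice (start - base) (0 : Int)
  have c1a := le_max_left (start - base) (0 : Int)
  have c1b := le_max_right (start - base) (0 : Int)
  have c2 := min_choice (end_ - base) (59 : Int)
  have c2a := min_le_left (end_ - base) (59 : Int)
  have c2b := min_le_right (end_ - base) (59 : Int)
  have c3 := max_choice start base
  have c3a := le_max_left start base
  have c3b := le_max_right start base
  have c4 := min_choice end_ (base + 59)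
  have c4a := min_le_left end_ (base + 59)
  have c4b := min_le_right end_ (base + 59)
  rw [Tm, Blk]
  split
  · next hcond =>
    have hfilter : (Finset.Icc (Max.max start base) (Min.min end_ (base + 59))).filter P3
        = (Finset.Icc (Max.max start base) (Min.min end_ (base + 59))).filter
            (fun t => t % 3 = 0) := by
      apply Finset.filter_congr
      intro t ht
      rw [Finset.mem_Icc] at ht
      have hv : is_valid_time t = true :=
        block_valid h m t hh hh' hm hm' (by omega) (by omega)
      simp [P3, hv]
    rw [hfilter, Icc_card_mod3 ((Min.min end_ (base + 59)) - (Max.max start base) + 1).toNat _ _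
      (by omega)]
    rw [PySem.Int.floordiv_eq_ediv_of_pos (show (0:Int) < 3 by norm_num),
        PySem.Int.floordiv_eq_ediv_of_pos (show (0:Int) < 3 by norm_num), hr]
    omega
  · next hcond =>
    rw [Finset.Icc_eq_empty (by omega)]
    simp

-- ---- partition of the valid times into (hour, minute) blocks ----
lemma part_eq (start end_ : Int) : (Finset.Icc start end_).filter P3
    = (Finset.Icc (0:Int) 23 ×ˢ Finset.Icc (0:Int) 59).biUnion (Blk start end_) := by
  ext t
  simp only [Finset.mem_filter, Finset.mem_Icc, Finset.mem_biUnion, Finset.mem_product, Blk]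
  constructor
  · rintro ⟨⟨h1, h2⟩, hp⟩
    have hv := (valid_iff t).mp hp.2
    have hbridge : t % 10000 % 100 = t % 100 := Int.emod_emod_of_dvd t (by norm_num)
    refine ⟨(t / 10000, (t % 10000) / 100), ⟨⟨hv.1, hv.2.1⟩, hv.2.2.1, hv.2.2.2.1⟩, ?_⟩
    exact ⟨⟨max_le h1 (by omega), le_min h2 (by omega)⟩, hp⟩
  · rintro ⟨⟨h', m'⟩, ⟨⟨hh0, hh1⟩, hm0, hm1⟩, ht⟩
    obtain ⟨⟨ht1, ht2⟩, hp⟩ := ht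
    exact ⟨⟨le_trans (le_max_left _ _) ht1, le_trans ht2 (min_le_left _ _)⟩, hp⟩

lemma blocks_disjoint (start end_ : Int) :
    ∀ x ∈ Finset.Icc (0:Int) 23 ×ˢ Finset.Icc (0:Int) 59,
    ∀ y ∈ Finset.Icc (0:Int) 23 ×ˢ Finset.Icc (0:Int) 59,
      x ≠ y → Disjoint (Blk start end_ x) (Blk start end_ y) := by
  rintro ⟨h1, m1⟩ hx ⟨h2, m2⟩ hy hne
  simp only [Finset.mem_product, Finset.mem_Icc] at hx hy
  rw [Finset.disjoint_left]
  intro t ht1 ht2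
  simp only [Blk, Finset.mem_filter, Finset.mem_Icc] at ht1 ht2
  have hb1 : h1 * 10000 + m1 * 100 ≤ t :=
    le_trans (le_max_right _ _) ht1.1.1
  have hb1' : t ≤ h1 * 10000 + m1 * 100 + 59 :=
    le_trans ht1.1.2 (min_le_right _ _)
  have hb2 : h2 * 10000 + m2 * 100 ≤ t :=
    le_trans (le_max_right _ _) ht2.1.1
  have hb2' : t ≤ h2 * 10000 + m2 * 100 + 59 :=
    le_trans ht2.1.2 (min_le_right _ _)
  have hne' : h1 ≠ h2 ∨ m1 ≠ m2 := by
    by_contra hc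
    push Not at hc
    exact hne (by simp [hc.1, hc.2])
  obtain ⟨⟨_, _⟩, _, _⟩ := hx
  obtain ⟨⟨_, _⟩, _, _⟩ := hy
  omega

-- ---- B computes Cnt ----
lemma B_eq (start end_ : Int) : count_3_multiples_in_segment_alt start end_ = (Cnt start end_ : Int) := by
  rw [count_3_multiples_in_segment_alt]
  have houter : ∀ (a : Int), (PySem.List.pyRange 0 24 1).foldl
      (fun total h => (PySem.List.pyRange 0 60 1).foldl
        (fun total m =>
          let base := h * 10000 + m * 100
          let lo := Max.max (start - base) 0
          let hi := Min.min (end_ - base) 59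
          if lo ≤ hi then
            let r := PySem.Int.mod (-(h + m)) 3
            total + (PySem.Int.floordiv (hi - r) 3 - PySem.Int.floordiv (lo - 1 - r) 3)
          else total) total) a
      = a + ((PySem.List.pyRange 0 24 1).map
          (fun h => ((PySem.List.pyRange 0 60 1).map (fun m => Tm start end_ h m)).sum)).sum := by
    apply foldl_body_add
    intro a h
    apply foldl_body_add
    intro a' m
    dsimp only [Tm]
    split
    · rfl
    · ring
  rw [houter]
  rw [sum_pyRange_map _ 24 0 24 (by norm_num)]
  have hin : ∀ h, ((PySem.List.pyRange 0 60 1).map (fun m => Tm start end_ h m)).sum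
      = ∑ m ∈ Finset.Icc (0:Int) 59, Tm start end_ h m := by
    intro h
    exact sum_pyRange_map _ 60 0 60 (by norm_num)
  have hsum : ∑ h ∈ Finset.Icc (0:Int) (24 - 1), ∑ m ∈ Finset.Icc (0:Int) 59, Tm start end_ h m
      = ((Cnt start end_ : Nat) : Int) := by
    have h24 : ((24:Int) - 1) = 23 := by norm_num
    rw [h24]
    have : ∀ h ∈ Finset.Icc (0:Int) 23, ∑ m ∈ Finset.Icc (0:Int) 59, Tm start end_ h m
        = ∑ m ∈ Finset.Icc (0:Int) 59, ((Blk start end_ (h, m)).card : Int) := by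
      intro h hh
      rw [Finset.mem_Icc] at hh
      apply Finset.sum_congr rfl
      intro m hm
      rw [Finset.mem_Icc] at hm
      exact Tm_eq_card start end_ h m hh.1 hh.2 hm.1 hm.2
    rw [Finset.sum_congr rfl this, ← Finset.sum_product']
    rw [Cnt, part_eq start end_, Finset.card_biUnion (blocks_disjoint start end_)]
    push_cast
    rfl
  simp only [hin]
  rw [hsum]
  ring

-- ---- no valid multiple of 3 lies in [5959, 10001] ----
lemma band_no_p3 (t : Int) (h : 5959 ≤ t) (h' : t ≤ 10001) : ¬ P3 t := by
  rintro ⟨hm3, hv⟩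
  rw [valid_iff] at hv
  rcases le_or_gt t 9999 with hc | hc
  · have hd : t / 10000 = 0 := by omega
    have hmm : t % 10000 = t := by omega
    rw [hmm] at hv
    omega
  · omega

-- ---- elif branch: outside D_ its 0 is the true count ----
lemma Cnt_elif_zero (start end_ : Int) (hle : start ≤ end_)
    (h2 : (6000 ≤ start ∧ start ≤ 9999) ∨ (6000 ≤ end_ ∧ end_ ≤ 9999))
    (hnd : ¬ D_count_3_multiples_in_segment start end_) :
    Cnt start end_ = 0 := by
  rw [D_count_3_multiples_in_segment] at hnd
  rw [Cnt, Finset.card_eq_zero]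
  ext t
  simp only [Finset.mem_filter, Finset.mem_Icc, Finset.notMem_empty, iff_false, not_and]
  intro ht hpm hpv
  exact band_no_p3 t (by omega) (by omega) ⟨hpm, hpv⟩

-- ---- the witness value of B ----
lemma B_at_witness : count_3_multiples_in_segment_alt 6000 10002 = 1 := by
  rw [B_eq]
  have : (Finset.Icc (6000:Int) 10002).filter P3 = {10002} := by
    ext t
    simp only [Finset.mem_filter, Finset.mem_Icc, Finset.mem_singleton, P3, valid_iff]
    omega
  rw [Cnt, this]
  simp

-- ---- A inside D_ returns 0 ----
lemma A_in_D (start end_ : Int) (hd : D_count_3_multiples_in_segment start end_) :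
    count_3_multiples_in_segment start end_ = 0 := by
  rw [D_count_3_multiples_in_segment] at hd
  obtain ⟨hle, hd | hd⟩ := hd
  · rw [count_3_multiples_in_segment, if_neg (by omega), if_neg (by omega),
      if_pos (Or.inl ⟨hd.1, hd.2.1⟩)]
  · rw [count_3_multiples_in_segment, if_neg (by omega), if_neg (by omega),
      if_pos (Or.inr ⟨hd.2.1, hd.2.2⟩)]

-- ---- B inside D_ is at least 1 ----
lemma B_in_D_pos (start end_ : Int) (hd : D_count_3_multiples_in_segment start end_) :
    1 ≤ count_3_multiples_in_segment_alt start end_ := by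
  rw [B_eq]
  rw [D_count_3_multiples_in_segment] at hd
  have hne : ((Finset.Icc start end_).filter P3).Nonempty := by
    obtain ⟨hle, hd | hd⟩ := hd
    · exact ⟨10002, by simp only [Finset.mem_filter, Finset.mem_Icc, P3, valid_iff]; omega⟩
    · exact ⟨5958, by simp only [Finset.mem_filter, Finset.mem_Icc, P3, valid_iff]; omega⟩
  have := Finset.card_pos.mpr hne
  rw [Cnt]
  omega

-- ===== VERDICT (by name: the statement is the Claim_ definition above) =====
theorem count_3_multiples_in_segment_spec : Claim_unchanged_count_3_multiples_in_segment := by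
  intro start end_ _ hndd
  rw [B_eq]
  by_cases hgt : start > end_
  · rw [count_3_multiples_in_segment, if_pos hgt, Cnt, Finset.Icc_eq_empty (by omega)]
    simp
  · by_cases hsp : start < 6000 ∧ end_ > 9999
    · rw [count_3_multiples_in_segment, if_neg hgt, if_pos hsp]
      rw [A_low start 5959 hsp.1 (by norm_num),
        A_main 10000 end_ (by omega) (by omega) (by omega) (by omega),
        Cnt_split start end_ hsp.1 hsp.2]
      push_cast
      ring
    · by_cases hel : (6000 ≤ start ∧ start ≤ 9999) ∨ (6000 ≤ end_ ∧ end_ ≤ 9999)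
      · rw [count_3_multiples_in_segment, if_neg hgt, if_neg hsp, if_pos hel]
        rw [Cnt_elif_zero start end_ (by omega) hel hndd]
        simp
      · exact A_main start end_ (by omega) hsp (by tauto) (by tauto)

theorem count_3_multiples_in_segment_changed : Claim_changed_count_3_multiples_in_segment := by
  unfold Claim_changed_count_3_multiples_in_segment
  refine ⟨by decide, by decide, ?_, ?_, by decide⟩
  · exact A_in_D 6000 10002 (by decide)
  · exact B_at_witness

theorem count_3_multiples_in_segment_tight : Claim_exact_count_3_multiples_in_segment := by
  intro start end_ _ hd
  rw [A_in_D start end_ hd]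
  have := B_in_D_pos start end_ hd
  omega
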